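-- pv_equiv track=rewrite | github.com/sir-gon/algorithm-exercises-py | src/hackerrank/implementation/between_two_sets.py | factor_of
-- ===== SOURCE A (Python) =====
-- def factor_of(_n: int, group: list[int]):
--     result: bool = True
--     i: int = 0
--
--     if len(group) == 0:
--         return False
--
--     while (i < len(group) and result):
--         if group[i] % _n != 0:
--             result = False
--
--         i += 1
--
--     return result
-- ===== SOURCE B (Python) =====
-- def _gcd(a, b):
--     a, b = abs(a), abs(b)
--     while b:
--         a, b = b, a % b
--     return a
--
--
-- def factor_of(_n, group):
--     if not group:
--         return False
--     g = 0
--     for x in group: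
--         g = _gcd(g, x)
--     return g % _n == 0
-- ===== Notes on version B (the rewrite author's own statement) =====
-- stated objective: alternative
-- what changed: B replaces A's per-element divisibility scan with a single aggregate: it folds gcd over the whole group once and then performs one divisibility test g % _n == 0.
import Mathlib
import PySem

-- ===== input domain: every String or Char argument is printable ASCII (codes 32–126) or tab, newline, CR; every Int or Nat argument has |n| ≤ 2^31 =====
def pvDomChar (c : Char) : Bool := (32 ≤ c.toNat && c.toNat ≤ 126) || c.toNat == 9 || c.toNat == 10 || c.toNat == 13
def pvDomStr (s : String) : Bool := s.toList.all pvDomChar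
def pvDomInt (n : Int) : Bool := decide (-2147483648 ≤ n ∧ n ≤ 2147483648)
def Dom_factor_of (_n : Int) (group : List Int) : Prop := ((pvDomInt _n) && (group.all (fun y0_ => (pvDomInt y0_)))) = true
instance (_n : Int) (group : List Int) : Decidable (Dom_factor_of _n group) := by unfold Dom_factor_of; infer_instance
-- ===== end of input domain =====

-- B replaces A's per-element divisibility scan with one aggregate gcd fold plus a single divisibility test.

-- ===== PORT A =====
-- while (i < len(group) and result): if group[i] % _n != 0: result = False; i += 1
def factor_of_loop (_n : Int) (group : List Int) (i : Nat) (result : Bool) : Bool :=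
  if i < group.length ∧ result then
    let result' :=
      if PySem.Int.mod ((PySem.List.pyGet? group (Int.ofNat i)).getD 0) _n ≠ 0 then false
      else result
    factor_of_loop _n group (i + 1) result'
  else result
termination_by group.length - i

def factor_of (_n : Int) (group : List Int) : Bool :=
  if group.length = 0 then false
  else factor_of_loop _n group 0 true

-- ===== PORT B =====
-- hand-written Euclidean gcd on absolute values: while b: a, b = b, a % b
def factor_of_gcd (a b : Nat) : Nat :=
  if _h : b = 0 then a else factor_of_gcd b (a % b)
termination_by b
decreasing_by exact Nat.mod_lt _ (Nat.pos_of_ne_zero _h)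

def factor_of_alt (_n : Int) (group : List Int) : Bool :=
  match group with
  | [] => false
  | _ :: _ =>
    let g : Int := group.foldl (fun acc x => Int.ofNat (factor_of_gcd acc.natAbs x.natAbs)) 0
    decide (PySem.Int.mod g _n = 0)

-- ===== PRECONDITION & SPEC =====
-- Pre_ excludes _n = 0 with a nonempty group: there A (and B) raise ZeroDivisionError.
def Pre_factor_of (_n : Int) (group : List Int) : Prop := group = [] ∨ _n ≠ 0
instance (_n : Int) (group : List Int) : Decidable (Pre_factor_of _n group) := by
  unfold Pre_factor_of; infer_instance
def pvWitness_factor_of : Int × List Int := (3, [6, -9, 12])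

def Spec_factor_of (_n : Int) (group : List Int) (out : Bool) : Prop := out = factor_of_alt _n group
instance (_n : Int) (group : List Int) (out : Bool) : Decidable (Spec_factor_of _n group out) := by
  unfold Spec_factor_of; infer_instance

-- ===== CLAIM (what is proved, stated in full; the proofs are below) =====
def Claim_equal_factor_of : Prop := ∀ (_n : Int) (group : List Int), Dom_factor_of _n group → Pre_factor_of _n group → Spec_factor_of _n group (factor_of _n group)

-- ===== LEMMAS AND PROOFS =====

theorem factor_of_gcd_eq (a b : Nat) : factor_of_gcd a b = Nat.gcd b a := by
  induction b using Nat.strong_induction_on generalizing a with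
  | _ b ih =>
    rw [factor_of_gcd]
    by_cases h : b = 0
    · simp [h]
    · simp only [h, dite_false]
      rw [ih (a % b) (Nat.mod_lt _ (Nat.pos_of_ne_zero h)) b, Nat.gcd_rec b a]

theorem factor_of_loop_false (_n : Int) (group : List Int) (i : Nat) :
    factor_of_loop _n group i false = false := by
  rw [factor_of_loop]; simp

-- A's loop from index i with result = true computes 'every element of the suffix is divisible'.
theorem factor_of_loop_true (_n : Int) (group : List Int) (i : Nat) :
    factor_of_loop _n group i true =
      (group.drop i).all (fun x => PySem.Int.mod x _n == 0) := by
  rw [factor_of_loop]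
  by_cases hi : i < group.length
  · have hget : (PySem.List.pyGet? group (Int.ofNat i)).getD 0 = group[i] := by
      simp [PySem.List.pyGet?, PySem.List.pyIdx?, hi]
    rw [List.drop_eq_getElem_cons hi, List.all_cons, if_pos (⟨hi, rfl⟩ : i < group.length ∧ true = true)]
    by_cases hm : PySem.Int.mod group[i] _n = 0
    · simp only [hget, hm, ne_eq, not_true_eq_false, if_false]
      rw [factor_of_loop_true _n group (i + 1)]
      simp
    · simp only [hget, hm, ne_eq, not_false_eq_true, if_true]
      rw [factor_of_loop_false]
      simp [hm]
  · rw [if_neg (by simp [hi]), List.drop_eq_nil_of_le (Nat.le_of_not_lt hi)]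
    simp
termination_by group.length - i

-- divisibility passes through one gcd step
theorem dvd_gcd_step (n acc x : Int) :
    n ∣ Int.ofNat (factor_of_gcd acc.natAbs x.natAbs) ↔ (n ∣ acc ∧ n ∣ x) := by
  rw [factor_of_gcd_eq]
  have hg : Int.ofNat (Nat.gcd x.natAbs acc.natAbs) = (Int.gcd x acc : Int) := by
    simp [Int.gcd]
  rw [hg, Int.coe_gcd, dvd_gcd_iff]
  exact and_comm

-- B's fold is divisible by n exactly when every element is.
theorem dvd_fold (n : Int) (l : List Int) (acc : Int) :
    n ∣ l.foldl (fun acc x => Int.ofNat (factor_of_gcd acc.natAbs x.natAbs)) acc ↔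
      (n ∣ acc ∧ ∀ x ∈ l, n ∣ x) := by
  induction l generalizing acc with
  | nil => simp
  | cons y t ih =>
    simp only [List.foldl_cons, ih, dvd_gcd_step, List.mem_cons]
    constructor
    · rintro ⟨⟨h1, h2⟩, h3⟩
      exact ⟨h1, fun x hx => hx.elim (fun e => e ▸ h2) (h3 x)⟩
    · rintro ⟨h1, h2⟩
      exact ⟨⟨h1, h2 y (Or.inl rfl)⟩, fun x hx => h2 x (Or.inr hx)⟩

-- ===== VERDICT (by name: the statement is the Claim_ definition above) =====
theorem factor_of_spec : Claim_equal_factor_of := by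
  intro _n group _hdom hpre
  unfold Spec_factor_of factor_of factor_of_alt
  match group with
  | [] => simp
  | h :: t =>
    have hn : _n ≠ 0 := by
      rcases hpre with h0 | h0
      · exact absurd h0 (by simp)
      · exact h0
    simp only [List.length_cons, Nat.succ_ne_zero, if_false]
    rw [factor_of_loop_true]
    simp only [List.drop_zero]
    rw [Bool.eq_iff_iff, List.all_eq_true, decide_eq_true_iff,
        PySem.Int.mod_eq_zero_iff_dvd, dvd_fold]
    constructor
    · intro hall
      exact ⟨dvd_zero _, fun x hx => (PySem.Int.mod_eq_zero_iff_dvd _ _).mp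
        (by simpa using hall x hx)⟩
    · rintro ⟨-, hall⟩ x hx
      simpa using (PySem.Int.mod_eq_zero_iff_dvd _ _).mpr (hall x hx)
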